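-- pv_equiv track=rewrite | github.com/DivineJK/MyPythonLibrary | MathLibrary/FZT.py | FZT
-- ===== SOURCE A (Python) =====
-- def FZT(f):
--     n = len(f)
--     if n <= 1:
--         return f
--     flg = [True]*(n+1)
--     p = 3
--     while p * p <= n:
--         if flg[p]:
--             for i in range(p*p, n+1, p<<1):
--                 flg[i] = False
--         p += 2
--     primes = [2]
--     for i in range(3, n+1, 2):
--         if flg[i]:
--             primes.append(i)
--     g = [f[i] for i in range(n)]
--     for i in primes:
--         t = 0
--         for j in range(i, n+1, i):
--             g[j-1] += g[t]
--             t += 1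
--     return g
-- ===== SOURCE B (Python) =====
-- def FZT(f):
--     n = len(f)
--     if n <= 1:
--         return f
--     g = [0] * n
--     for i in range(1, n + 1):
--         for j in range(i, n + 1, i):
--             g[j - 1] += f[i - 1]
--     return g
-- ===== Notes on version B (the rewrite author's own statement) =====
-- stated objective: simpler
-- what changed: B drops A's odd-only prime sieve and the prime-wise in-place passes entirely and computes the divisor zeta transform directly: starting from a zero array it scatters f[i-1] onto every multiple of i with one (divisor, multiple) double loop.
import Mathlib
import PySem

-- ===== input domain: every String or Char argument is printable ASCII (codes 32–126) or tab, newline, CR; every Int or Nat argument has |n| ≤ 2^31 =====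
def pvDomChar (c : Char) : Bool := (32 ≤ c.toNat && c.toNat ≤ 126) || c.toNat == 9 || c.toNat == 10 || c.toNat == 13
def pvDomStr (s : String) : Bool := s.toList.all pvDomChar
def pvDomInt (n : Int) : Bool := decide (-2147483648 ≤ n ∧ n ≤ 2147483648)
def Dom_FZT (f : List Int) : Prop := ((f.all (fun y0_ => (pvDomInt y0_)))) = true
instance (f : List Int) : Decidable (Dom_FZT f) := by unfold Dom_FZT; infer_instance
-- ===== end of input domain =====

-- B drops A's odd-only prime sieve and the prime-wise in-place passes and computes the divisor
-- zeta transform directly with one (divisor, multiple) double loop; objective: simpler.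

-- ===== PORT A =====

-- inner marking loop of the sieve: `for i in range(p*p, n+1, p<<1): flg[i] = False`
def FZTmark (n p : Nat) (flg : List Bool) : List Bool :=
  (PySem.List.pyRange ((p : Int) * (p : Int)) ((n : Int) + 1) (2 * (p : Int))).foldl
    (fun fl i => PySem.List.pySetD fl i false) flg

-- the `while p * p <= n:` loop, p starting at 3 and stepping by 2
def FZTsieve (n p : Nat) (flg : List Bool) : List Bool :=
  if h : p * p ≤ n then
    FZTsieve n (p + 2) (if PySem.List.pyGetD flg (p : Int) true then FZTmark n p flg else flg)
  else flg
termination_by n + 1 - p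
decreasing_by
  have h1 : p = 0 ∨ p ≤ p * p := by
    rcases p with _ | q
    · exact Or.inl rfl
    · exact Or.inr (Nat.le_mul_of_pos_left _ (Nat.succ_pos q))
  omega

def FZT (f : List Int) : List Int :=
  let n := f.length
  if n ≤ 1 then f
  else
    let flg := FZTsieve n 3 (List.replicate (n + 1) true)
    let primes : List Int :=
      (PySem.List.pyRange 3 ((n : Int) + 1) 2).foldl
        (fun ps i => if PySem.List.pyGetD flg i true then ps ++ [i] else ps) [2]
    let g0 : List Int := (PySem.List.pyRange 0 (n : Int) 1).map (fun i => PySem.List.pyGetD f i 0)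
    primes.foldl (fun g i =>
      ((PySem.List.pyRange i ((n : Int) + 1) i).foldl
        (fun (s : List Int × Int) j =>
          (PySem.List.pySetD s.1 (j - 1)
             (PySem.List.pyGetD s.1 (j - 1) 0 + PySem.List.pyGetD s.1 s.2 0),
           s.2 + 1))
        (g, 0)).1) g0

-- ===== PORT B =====
def FZT_alt (f : List Int) : List Int :=
  let n := f.length
  if n ≤ 1 then f
  else
    (PySem.List.pyRange 1 ((n : Int) + 1) 1).foldl (fun g i =>
      (PySem.List.pyRange i ((n : Int) + 1) i).foldl (fun g j =>
        PySem.List.pySetD g (j - 1)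
          (PySem.List.pyGetD g (j - 1) 0 + PySem.List.pyGetD f (i - 1) 0)) g)
      (List.replicate n 0)

-- ===== PRECONDITION & SPEC =====
def Spec_FZT (f : List Int) (out : List Int) : Prop := out = FZT_alt f
instance (f : List Int) (out : List Int) : Decidable (Spec_FZT f out) := by unfold Spec_FZT; infer_instance

-- ===== CLAIM (what is proved, stated in full; the proofs are below) =====
def Claim_equal_FZT : Prop := ∀ (f : List Int), Dom_FZT f → Spec_FZT f (FZT f)

-- ===== LEMMAS AND PROOFS =====

-- partial transform: only cofactors whose prime factors all lie in P have been folded in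
def fsum (f : List Int) (P : List Nat) (m : Nat) : Int :=
  ∑ c ∈ (m + 1).divisors.filter (fun c => ∀ q ∈ c.primeFactors, q ∈ P), f.getD ((m + 1) / c - 1) 0

-- the value A's in-place pass for p leaves at position m (it reads already-updated cells)
def chain (g : List Int) (p : Nat) (m : Nat) : Int :=
  if h : 2 ≤ p ∧ p ∣ (m + 1) then g.getD m 0 + chain g p ((m + 1) / p - 1)
  else g.getD m 0
termination_by m
decreasing_by
  have h2 : (m + 1) / p ≤ (m + 1) / 2 := Nat.div_le_div_left h.1 two_pos
  have h4 : m ≠ 0 := by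
    rintro rfl
    have := Nat.le_of_dvd one_pos h.2
    omega
  omega

-- one update step of A's inner loop (state: current list, running index t)
def stepA : List Int × Int → Int → List Int × Int := fun s j =>
  (PySem.List.pySetD s.1 (j - 1)
     (PySem.List.pyGetD s.1 (j - 1) 0 + PySem.List.pyGetD s.1 s.2 0),
   s.2 + 1)

-- one update step of B's inner loop (v = f[i-1] is fixed during the loop)
def stepB (v : Int) : List Int → Int → List Int := fun g j =>
  PySem.List.pySetD g (j - 1) (PySem.List.pyGetD g (j - 1) 0 + v)

-- i marked by the sieve once the outer variable has passed p
def Marked (p i : Nat) : Prop := ¬ 2 ∣ i ∧ ∃ q, q < p ∧ q.Prime ∧ q ∣ i ∧ q * q ≤ i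

def natOdds (n : Nat) : List Nat := (List.range ((n - 1) / 2)).map (fun k => 3 + 2 * k)

def natPrimes (n : Nat) (flg : List Bool) : List Nat :=
  2 :: (natOdds n).filter (fun i => flg.getD i true)

theorem getD_set_if {α : Type} (l : List α) (i j : Nat) (v d : α) :
    (l.set i v).getD j d = if j = i ∧ i < l.length then v else l.getD j d := by
  rw [List.getD_eq_getElem?_getD, List.getD_eq_getElem?_getD, List.getElem?_set]
  by_cases h1 : i = j
  · subst h1
    by_cases h2 : i < l.length
    · simp [h2]
    · simp [h2]
  · rw [if_neg h1, if_neg (fun hh => h1 hh.1.symm)]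

theorem chain_of_not_dvd {g : List Int} {p m : Nat} (h : ¬ p ∣ (m+1)) :
    chain g p m = g.getD m 0 := by
  rw [chain, dif_neg (fun hc => h hc.2)]

-- range(p, n+1, p) is the list of multiples p*(t+1), t < n/p
theorem pyRange_mul (n p : Nat) (hp : 1 ≤ p) :
    PySem.List.pyRange (p : Int) ((n : Int) + 1) (p : Int)
      = (List.range (n / p)).map (fun t => ((p * (t + 1) : Nat) : Int)) := by
  rw [PySem.List.pyRange_of_pos _ _ (by exact_mod_cast hp : (0:Int) < (p:Int))]
  have hcnt : (if (p:Int) < (n:Int)+1 then (((n:Int)+1-(p:Int)+((p:Int)-1))/(p:Int)).toNat else 0) = n / p := by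
    split_ifs with h
    · have h2 : ((n:Int)+1-(p:Int)+((p:Int)-1)) = (n:Int) := by ring
      rw [h2]
      norm_cast
    · have h3 : n < p := by omega
      exact (Nat.div_eq_of_lt h3).symm
  rw [show ((n:Int) + 1 - (p:Int) + (p:Int) - 1) = ((n:Int)+1-(p:Int)+((p:Int)-1)) by ring, hcnt]
  apply List.map_congr_left
  intro t _
  push_cast
  ring

-- range(3, n+1, 2) is the list of odd numbers 3+2k, k < (n-1)/2
theorem pyRange_odd (n : Nat) :
    PySem.List.pyRange 3 ((n : Int) + 1) 2
      = (List.range ((n - 1) / 2)).map (fun k => ((3 + 2 * k : Nat) : Int)) := by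
  rw [PySem.List.pyRange_of_pos _ _ (by norm_num : (0:Int) < 2)]
  have hcnt : (if (3:Int) < (n:Int)+1 then (((n:Int)+1-3+2-1)/2).toNat else 0) = (n-1) / 2 := by
    split_ifs with h
    · have hn : 3 ≤ n := by omega
      have h2 : ((n:Int)+1-3+2-1) = ((n-1 : Nat) : Int) := by omega
      rw [h2]
      norm_cast
    · have : n ≤ 2 := by omega
      interval_cases n <;> simp
  rw [hcnt]
  apply List.map_congr_left
  intro t _
  push_cast
  ring

theorem fsum_nil (f : List Int) (m : Nat) : fsum f [] m = f.getD m 0 := by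
  unfold fsum
  have h : (m+1).divisors.filter (fun c => ∀ q ∈ c.primeFactors, q ∈ ([]:List Nat)) = {1} := by
    ext c
    simp only [Finset.mem_filter, Nat.mem_divisors, Finset.mem_singleton, List.not_mem_nil]
    constructor
    · rintro ⟨⟨hc, hN⟩, hq⟩
      have : c.primeFactors = ∅ := by
        ext q; simp only [Finset.notMem_empty, iff_false]; exact fun hq' => hq q hq'
      rcases Nat.primeFactors_eq_empty.mp this with h0 | h1
      · exact absurd h0 (by rintro rfl; exact hN (Nat.eq_zero_of_zero_dvd hc))
      · exact h1
    · rintro rfl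
      simp
  rw [h]
  simp

theorem fsum_congr (f : List Int) {P P' : List Nat} (h : ∀ q, q ∈ P ↔ q ∈ P') (m : Nat) :
    fsum f P m = fsum f P' m := by
  unfold fsum
  congr 1
  apply Finset.filter_congr
  intro c _
  constructor <;> intro hq q hql <;> [exact (h q).mp (hq q hql); exact (h q).mpr (hq q hql)]

theorem fsum_triv (f : List Int) {P : List Nat} {p m : Nat} (hd : ¬ p ∣ (m+1)) :
    fsum f (p::P) m = fsum f P m := by
  unfold fsum
  congr 1
  apply Finset.filter_congr
  intro c hc
  rw [Nat.mem_divisors] at hc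
  simp only [List.mem_cons]
  constructor
  · intro hq q hql
    rcases hq q hql with rfl | h
    · exact absurd (dvd_trans (Nat.dvd_of_mem_primeFactors hql) hc.1) hd
    · exact h
  · exact fun hq q hql => Or.inr (hq q hql)

theorem fsum_rec (f : List Int) {P : List Nat} {p m : Nat} (hp : p.Prime) (hP : p ∉ P)
    (hd : p ∣ (m+1)) :
    fsum f (p::P) m = fsum f P m + fsum f (p::P) ((m+1)/p - 1) := by
  have hN : m + 1 ≠ 0 := Nat.succ_ne_zero m
  have hdivpos : 0 < (m+1)/p := Nat.div_pos (Nat.le_of_dvd (Nat.succ_pos m) hd) hp.pos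
  have hm' : (m+1)/p - 1 + 1 = (m+1)/p := by omega
  unfold fsum
  rw [hm']
  rw [← Finset.sum_filter_add_sum_filter_not
       ((m+1).divisors.filter (fun c => ∀ q ∈ c.primeFactors, q ∈ p::P)) (fun c => p ∣ c)]
  rw [add_comm]
  congr 1
  · rw [Finset.filter_filter]
    congr 1
    apply Finset.filter_congr
    intro c hc
    rw [Nat.mem_divisors] at hc
    constructor
    · rintro ⟨hpred, hnpc⟩ q hql
      rcases List.mem_cons.mp (hpred q hql) with rfl | h
      · exact absurd (Nat.dvd_of_mem_primeFactors hql) hnpc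
      · exact h
    · intro hpred
      have hc0 : c ≠ 0 := by rintro rfl; exact hN (Nat.eq_zero_of_zero_dvd hc.1)
      have hnpc : ¬ p ∣ c := fun hpc =>
        hP (hpred p (Nat.mem_primeFactors.mpr ⟨hp, hpc, hc0⟩))
      exact ⟨fun q hql => List.mem_cons.mpr (Or.inr (hpred q hql)), hnpc⟩
  · rw [Finset.filter_filter]
    apply Finset.sum_nbij' (fun c => c / p) (fun c => p * c)
    · intro c hc
      simp only [Finset.mem_filter, Nat.mem_divisors] at hc ⊢
      obtain ⟨⟨hcd, _⟩, hpred, hpc⟩ := hc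
      obtain ⟨a, rfl⟩ := hpc
      have ha : a ≠ 0 := by rintro rfl; rw [mul_zero] at hcd; exact hN (Nat.eq_zero_of_zero_dvd hcd)
      have ha0 : p * a ≠ 0 := mul_ne_zero hp.ne_zero ha
      refine ⟨⟨?_, hdivpos.ne'⟩, ?_⟩
      · rw [Nat.mul_div_cancel_left _ hp.pos]
        obtain ⟨b, hb⟩ := hcd
        exact ⟨b, by rw [hb, mul_assoc, Nat.mul_div_cancel_left _ hp.pos]⟩
      · rw [Nat.mul_div_cancel_left _ hp.pos]
        intro q hq
        exact hpred q (Nat.primeFactors_mono (Dvd.intro_left p rfl) ha0 hq)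
    · intro c hc
      simp only [Finset.mem_filter, Nat.mem_divisors] at hc ⊢
      obtain ⟨⟨hcd, hNp⟩, hpred⟩ := hc
      have hc0 : c ≠ 0 := by rintro rfl; have := zero_dvd_iff.mp hcd; omega
      refine ⟨⟨?_, hN⟩, ?_, Dvd.intro c rfl⟩
      · calc p * c ∣ p * ((m+1)/p) := mul_dvd_mul_left p hcd
          _ = m + 1 := Nat.mul_div_cancel' hd
      · intro q hq
        rw [Nat.primeFactors_mul hp.ne_zero hc0, Finset.mem_union] at hq
        rcases hq with hq | hq
        · rw [hp.primeFactors, Finset.mem_singleton] at hq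
          exact hq ▸ List.mem_cons_self
        · exact hpred q hq
    · intro c hc
      simp only [Finset.mem_filter] at hc
      exact Nat.mul_div_cancel' hc.2.2
    · intro c _
      exact Nat.mul_div_cancel_left _ hp.pos
    · intro c hc
      simp only [Finset.mem_filter] at hc
      obtain ⟨_, _, hpc⟩ := hc
      obtain ⟨a, rfl⟩ := hpc
      rw [Nat.mul_div_cancel_left _ hp.pos, Nat.div_div_eq_div_mul]

theorem chain_fsum (f : List Int) (n : Nat) (g : List Int) (P : List Nat) (p : Nat)
    (hp : p.Prime) (hP : p ∉ P) (hg : ∀ m', m' < n → g.getD m' 0 = fsum f P m') :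
    ∀ m, m < n → chain g p m = fsum f (p::P) m := by
  intro m
  induction m using Nat.strong_induction_on with
  | _ m ih =>
    intro hm
    rw [chain]
    by_cases hcond : 2 ≤ p ∧ p ∣ (m + 1)
    · rw [dif_pos hcond]
      have hlt : (m + 1) / p - 1 < m := by
        have h2 : (m + 1) / p ≤ (m + 1) / 2 := Nat.div_le_div_left hcond.1 two_pos
        have h4 : m ≠ 0 := by
          rintro rfl
          have := Nat.le_of_dvd one_pos hcond.2
          omega
        omega
      rw [ih _ hlt (lt_trans hlt hm), hg m hm, fsum_rec f hp hP hcond.2]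
    · rw [dif_neg hcond]
      have hnd : ¬ p ∣ (m + 1) := fun hd => hcond ⟨hp.two_le, hd⟩
      rw [hg m hm, fsum_triv f hnd]

theorem fsum_full (f : List Int) (n : Nat) (P : List Nat) (hc : ∀ q, q.Prime → q ≤ n → q ∈ P)
    (m : Nat) (hm : m < n) : fsum f P m = ∑ d ∈ (m+1).divisors, f.getD (d - 1) 0 := by
  unfold fsum
  rw [Finset.filter_true_of_mem]
  · exact Nat.sum_div_divisors (m+1) (fun d => f.getD (d - 1) 0)
  · intro c hc'
    rw [Nat.mem_divisors] at hc'
    intro q hq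
    have hq1 : q ∣ m + 1 := dvd_trans (Nat.dvd_of_mem_primeFactors hq) hc'.1
    exact hc q (Nat.prime_of_mem_primeFactors hq) (le_trans (Nat.le_of_dvd (Nat.succ_pos m) hq1) hm)

theorem range_sum_divisors (f : List Int) (n m : Nat) (hm : m < n) :
    ∑ t ∈ Finset.range n, (if (t+1) ∣ (m+1) then f.getD t 0 else 0)
      = ∑ d ∈ (m+1).divisors, f.getD (d - 1) 0 := by
  have h1 : ∑ t ∈ Finset.range n, (if (t+1) ∣ (m+1) then f.getD t 0 else 0)
      = ∑ d ∈ Finset.Ico 1 (n+1), (if d ∣ (m+1) then f.getD (d-1) 0 else 0) := by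
    rw [Finset.sum_Ico_eq_sum_range]
    simp only [add_tsub_cancel_right]
    apply Finset.sum_congr rfl
    intro t _
    rw [add_comm 1 t]
    simp
  rw [h1, ← Finset.sum_filter]
  congr 1
  ext d
  simp only [Finset.mem_filter, Finset.mem_Ico, Nat.mem_divisors]
  constructor
  · rintro ⟨_, hd⟩; exact ⟨hd, Nat.succ_ne_zero m⟩
  · rintro ⟨hd, _⟩
    have hd0 : d ≠ 0 := by rintro rfl; exact (Nat.succ_ne_zero m) (Nat.eq_zero_of_zero_dvd hd)
    have hdle : d ≤ m + 1 := Nat.le_of_dvd (Nat.succ_pos m) hd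
    exact ⟨⟨by omega, by omega⟩, hd⟩

theorem passA_inv (n p : Nat) (hp : 2 ≤ p) (g : List Int) (hg : g.length = n) :
    ∀ c, c ≤ n / p →
      ((List.range c).foldl (fun s t => stepA s ((p * (t+1) : Nat) : Int)) (g, (0:Int))).2 = (c : Int)
      ∧ ((List.range c).foldl (fun s t => stepA s ((p * (t+1) : Nat) : Int)) (g, (0:Int))).1.length = n
      ∧ ∀ m, m < n →
        ((List.range c).foldl (fun s t => stepA s ((p * (t+1) : Nat) : Int)) (g, (0:Int))).1.getD m 0
          = if p ∣ (m+1) ∧ m+1 ≤ c*p then chain g p m else g.getD m 0 := by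
  intro c
  induction c with
  | zero =>
    intro _
    refine ⟨rfl, hg, fun m _ => ?_⟩
    simp only [List.range_zero, List.foldl_nil]
    exact (if_neg (by rintro ⟨_, hle⟩; rw [Nat.zero_mul] at hle; omega)).symm
  | succ c ih =>
    intro hc1
    obtain ⟨ih2, ihlen, ihval⟩ := ih (le_trans (Nat.le_succ c) hc1)
    rw [List.range_succ, List.foldl_append, List.foldl_cons, List.foldl_nil]
    set r := (List.range c).foldl (fun s t => stepA s ((p * (t+1) : Nat) : Int)) (g, (0:Int)) with hr
    have e1 : (c+1)*p = c*p + p := by ring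
    have e2 : p*(c+1) = c*p + p := by ring
    have e3 : c ≤ c*p := Nat.le_mul_of_pos_right c (by omega)
    have hjn : (c+1)*p ≤ n := (Nat.le_div_iff_mul_le (by omega)).mp hc1
    have hj1 : 1 ≤ p * (c+1) := by omega
    have hcast : ((p * (c+1) : Nat) : Int) - 1 = ((p * (c+1) - 1 : Nat) : Int) := by
      push_cast [hj1]; ring
    have hstep : stepA r ((p * (c+1) : Nat) : Int)
        = (r.1.set (p*(c+1)-1) (r.1.getD (p*(c+1)-1) 0 + r.1.getD c 0), r.2 + 1) := by
      rw [stepA, hcast, PySem.List.pySetD_natCast, PySem.List.pyGetD_natCast, ih2,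
        PySem.List.pyGetD_natCast]
    rw [hstep]
    have hchainc : r.1.getD c 0 = chain g p c := by
      have hcn : c < n := by omega
      rw [ihval c hcn]
      by_cases hpc : p ∣ c + 1
      · obtain ⟨a, ha⟩ := hpc
        have ha1 : 1 ≤ a := by rcases a with _ | a' <;> omega
        have hac : a ≤ c := by nlinarith
        have hle : c + 1 ≤ c * p := by
          rw [ha, mul_comm c p]
          exact Nat.mul_le_mul_left p hac
        rw [if_pos ⟨⟨a, ha⟩, hle⟩]
      · rw [if_neg (fun hh => hpc hh.1), chain_of_not_dvd hpc]
    have hold : r.1.getD (p*(c+1)-1) 0 = g.getD (p*(c+1)-1) 0 := by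
      rw [ihval _ (by omega)]
      rw [if_neg]
      rintro ⟨_, hle⟩
      omega
    have hnew : r.1.getD (p*(c+1)-1) 0 + r.1.getD c 0 = chain g p (p*(c+1)-1) := by
      rw [chain, dif_pos ⟨hp, by rw [(by omega : p*(c+1) - 1 + 1 = p*(c+1))]; exact ⟨c+1, mul_comm p (c+1) ▸ rfl⟩⟩]
      rw [(by omega : p*(c+1) - 1 + 1 = p*(c+1)), Nat.mul_div_cancel_left (c+1) (by omega : 0 < p)]
      rw [hold, hchainc]
      simp
    refine ⟨by push_cast [ih2]; ring, by simp [ihlen], fun m hm => ?_⟩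
    rw [getD_set_if]
    by_cases hme : m = p*(c+1)-1
    · subst hme
      rw [if_pos ⟨rfl, by omega⟩, hnew]
      rw [if_pos ⟨by rw [(by omega : p*(c+1) - 1 + 1 = p*(c+1))]; exact ⟨c+1, mul_comm p (c+1) ▸ rfl⟩,
        by omega⟩]
    · rw [if_neg (fun hh => hme hh.1), ihval m hm]
      by_cases hdm : p ∣ m + 1
      · obtain ⟨a, ha⟩ := hdm
        have hane : a ≠ c + 1 := by rintro rfl; omega
        have h1 : m + 1 ≤ c * p ↔ m + 1 ≤ (c+1) * p := by
          constructor
          · intro h; omega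
          · intro h
            rw [ha, mul_comm c p, mul_comm (c+1) p] at *
            have ha1 : a ≤ c + 1 := Nat.le_of_mul_le_mul_left (by omega) (by omega)
            have ha2 : a ≤ c := by omega
            exact Nat.mul_le_mul_left p ha2
        by_cases hle : m + 1 ≤ c * p
        · rw [if_pos ⟨⟨a, ha⟩, hle⟩, if_pos ⟨⟨a, ha⟩, h1.mp hle⟩]
        · rw [if_neg (fun hh => hle hh.2), if_neg (fun hh => hle (h1.mpr hh.2))]
      · rw [if_neg (fun hh => hdm hh.1), if_neg (fun hh => hdm hh.1)]

theorem passB_inv (n i : Nat) (hi : 1 ≤ i) (v : Int) (g : List Int) (hg : g.length = n) :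
    ∀ c, c ≤ n / i →
      ((List.range c).foldl (fun s t => stepB v s ((i * (t+1) : Nat) : Int)) g).length = n
      ∧ ∀ m, m < n →
        ((List.range c).foldl (fun s t => stepB v s ((i * (t+1) : Nat) : Int)) g).getD m 0
          = g.getD m 0 + (if i ∣ (m+1) ∧ m+1 ≤ c*i then v else 0) := by
  intro c
  induction c with
  | zero =>
    refine fun _ => ⟨hg, fun m _ => ?_⟩
    simp only [List.range_zero, List.foldl_nil]
    rw [if_neg (by rintro ⟨_, hle⟩; rw [Nat.zero_mul] at hle; omega), add_zero]
  | succ c ih =>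
    intro hc1
    obtain ⟨ihlen, ihval⟩ := ih (le_trans (Nat.le_succ c) hc1)
    rw [List.range_succ, List.foldl_append, List.foldl_cons, List.foldl_nil]
    set r := (List.range c).foldl (fun s t => stepB v s ((i * (t+1) : Nat) : Int)) g with hr
    have e1 : (c+1)*i = c*i + i := by ring
    have e2 : i*(c+1) = c*i + i := by ring
    have e3 : c ≤ c*i := Nat.le_mul_of_pos_right c (by omega)
    have hjn : (c+1)*i ≤ n := (Nat.le_div_iff_mul_le (by omega)).mp hc1
    have hj1 : 1 ≤ i * (c+1) := by omega
    have hcast : ((i * (c+1) : Nat) : Int) - 1 = ((i * (c+1) - 1 : Nat) : Int) := by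
      push_cast [hj1]; ring
    have hstep : stepB v r ((i * (c+1) : Nat) : Int)
        = r.set (i*(c+1)-1) (r.getD (i*(c+1)-1) 0 + v) := by
      rw [stepB, hcast, PySem.List.pySetD_natCast, PySem.List.pyGetD_natCast]
    rw [hstep]
    have hold : r.getD (i*(c+1)-1) 0 = g.getD (i*(c+1)-1) 0 := by
      rw [ihval _ (by omega), if_neg (by rintro ⟨_, hle⟩; omega), add_zero]
    refine ⟨by simp [ihlen], fun m hm => ?_⟩
    rw [getD_set_if]
    by_cases hme : m = i*(c+1)-1
    · subst hme
      rw [if_pos ⟨rfl, by omega⟩, hold]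
      rw [if_pos ⟨by rw [(by omega : i*(c+1) - 1 + 1 = i*(c+1))]; exact ⟨c+1, mul_comm i (c+1) ▸ rfl⟩,
        by omega⟩]
    · rw [if_neg (fun hh => hme hh.1), ihval m hm]
      by_cases hdm : i ∣ m + 1
      · obtain ⟨a, ha⟩ := hdm
        have hane : a ≠ c + 1 := by rintro rfl; omega
        have h1 : m + 1 ≤ c * i ↔ m + 1 ≤ (c+1) * i := by
          constructor
          · intro h; omega
          · intro h
            rw [ha, mul_comm c i, mul_comm (c+1) i] at *
            have ha1 : a ≤ c + 1 := Nat.le_of_mul_le_mul_left (by omega) (by omega)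
            have ha2 : a ≤ c := by omega
            exact Nat.mul_le_mul_left i ha2
        by_cases hle : m + 1 ≤ c * i
        · rw [if_pos ⟨⟨a, ha⟩, hle⟩, if_pos ⟨⟨a, ha⟩, h1.mp hle⟩]
        · rw [if_neg (fun hh => hle hh.2), if_neg (fun hh => hle (h1.mpr hh.2))]
      · rw [if_neg (fun hh => hdm hh.1), if_neg (fun hh => hdm hh.1)]

-- m+1 a multiple of p within [1,n] lies within the first n/p multiples
theorem le_div_mul {p m n : Nat} (hp : 0 < p) (hd : p ∣ m+1) (hle : m+1 ≤ n) :
    m+1 ≤ (n/p)*p := by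
  obtain ⟨a, ha⟩ := hd
  have h1 : a ≤ n / p := by
    have h2 : a = (m+1)/p := by rw [ha, Nat.mul_div_cancel_left _ hp]
    rw [h2]; exact Nat.div_le_div_right hle
  calc m+1 = a*p := by rw [ha, mul_comm]
    _ ≤ (n/p)*p := Nat.mul_le_mul_right p h1

theorem passA_full (n p : Nat) (hp : 2 ≤ p) (g : List Int) (hg : g.length = n) :
    ((PySem.List.pyRange (p : Int) ((n : Int) + 1) (p : Int)).foldl stepA (g, (0:Int))).1.length = n
    ∧ ∀ m, m < n →
      ((PySem.List.pyRange (p : Int) ((n : Int) + 1) (p : Int)).foldl stepA (g, (0:Int))).1.getD m 0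
        = chain g p m := by
  rw [pyRange_mul n p (by omega), List.foldl_map]
  obtain ⟨_, hlen, hval⟩ := passA_inv n p hp g hg (n/p) le_rfl
  refine ⟨hlen, fun m hm => ?_⟩
  rw [hval m hm]
  by_cases hd : p ∣ m + 1
  · rw [if_pos ⟨hd, le_div_mul (by omega) hd hm⟩]
  · rw [if_neg (fun hh => hd hh.1), chain_of_not_dvd hd]

theorem passB_full (n i : Nat) (hi : 1 ≤ i) (v : Int) (g : List Int) (hg : g.length = n) :
    ((PySem.List.pyRange (i : Int) ((n : Int) + 1) (i : Int)).foldl (stepB v) g).length = n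
    ∧ ∀ m, m < n →
      ((PySem.List.pyRange (i : Int) ((n : Int) + 1) (i : Int)).foldl (stepB v) g).getD m 0
        = g.getD m 0 + (if i ∣ (m+1) then v else 0) := by
  rw [pyRange_mul n i hi, List.foldl_map]
  obtain ⟨hlen, hval⟩ := passB_inv n i hi v g hg (n/i) le_rfl
  refine ⟨hlen, fun m hm => ?_⟩
  rw [hval m hm]
  by_cases hd : i ∣ m + 1
  · rw [if_pos ⟨hd, le_div_mul (by omega) hd hm⟩, if_pos hd]
  · rw [if_neg (fun hh => hd hh.1), if_neg hd]

theorem outerA (f : List Int) (n : Nat) :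
    ∀ (L P : List Nat) (g : List Int), (∀ q ∈ L, q.Prime) → L.Nodup → (∀ q ∈ L, q ∉ P) →
      g.length = n → (∀ m, m < n → g.getD m 0 = fsum f P m) →
      (L.foldl (fun (g : List Int) (q : Nat) =>
          ((PySem.List.pyRange (q : Int) ((n : Int) + 1) (q : Int)).foldl stepA (g, (0:Int))).1) g).length = n
      ∧ ∀ m, m < n →
        (L.foldl (fun (g : List Int) (q : Nat) =>
          ((PySem.List.pyRange (q : Int) ((n : Int) + 1) (q : Int)).foldl stepA (g, (0:Int))).1) g).getD m 0
          = fsum f (L ++ P) m := by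
  intro L
  induction L with
  | nil => exact fun P g _ _ _ hlen hval => ⟨hlen, by simpa using hval⟩
  | cons q L ih =>
    intro P g hpr hnd hnp hlen hval
    rw [List.foldl_cons]
    have hq : q.Prime := hpr q List.mem_cons_self
    obtain ⟨hlen1, hval1⟩ := passA_full n q hq.two_le g hlen
    have hval1' : ∀ m, m < n →
        ((PySem.List.pyRange (q : Int) ((n : Int) + 1) (q : Int)).foldl stepA (g, (0:Int))).1.getD m 0
          = fsum f (q::P) m := by
      intro m hm
      rw [hval1 m hm]
      exact chain_fsum f n g P q hq (hnp q List.mem_cons_self) hval m hm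
    obtain ⟨hlen2, hval2⟩ := ih (q::P) _
      (fun q' hq' => hpr q' (List.mem_cons_of_mem q hq'))
      hnd.of_cons
      (fun q' hq' hmem => by
        rcases List.mem_cons.mp hmem with rfl | hmem'
        · exact (List.nodup_cons.mp hnd).1 hq'
        · exact hnp q' (List.mem_cons_of_mem q hq') hmem')
      hlen1 hval1'
    refine ⟨hlen2, fun m hm => ?_⟩
    rw [hval2 m hm]
    apply fsum_congr
    intro x
    simp only [List.mem_append, List.mem_cons]
    tauto

theorem outerB (f : List Int) (n : Nat) :
    ∀ k, k ≤ n →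
      ((List.range k).foldl (fun (g : List Int) (t : Nat) =>
         (PySem.List.pyRange ((t+1 : Nat) : Int) ((n:Int)+1) ((t+1 : Nat) : Int)).foldl
           (stepB (f.getD t 0)) g) (List.replicate n 0)).length = n
      ∧ ∀ m, m < n →
        ((List.range k).foldl (fun (g : List Int) (t : Nat) =>
           (PySem.List.pyRange ((t+1 : Nat) : Int) ((n:Int)+1) ((t+1 : Nat) : Int)).foldl
             (stepB (f.getD t 0)) g) (List.replicate n 0)).getD m 0
          = ∑ t ∈ Finset.range k, (if (t+1) ∣ (m+1) then f.getD t 0 else 0) := by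
  intro k
  induction k with
  | zero =>
    refine fun _ => ⟨by simp, fun m hm => ?_⟩
    simp
  | succ k ih =>
    intro hk1
    obtain ⟨ihlen, ihval⟩ := ih (by omega)
    rw [List.range_succ, List.foldl_append, List.foldl_cons, List.foldl_nil]
    obtain ⟨hlen, hval⟩ := passB_full n (k+1) (by omega) (f.getD k 0) _ ihlen
    refine ⟨hlen, fun m hm => ?_⟩
    rw [hval m hm, ihval m hm, Finset.sum_range_succ]

theorem foldl_pySetD_false (L : List Int) :
    ∀ (flg : List Bool), (∀ x ∈ L, 0 ≤ x ∧ x.toNat < flg.length) →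
      (L.foldl (fun fl x => PySem.List.pySetD fl x false) flg).length = flg.length
      ∧ ∀ (i : Nat), i < flg.length →
        ((L.foldl (fun fl x => PySem.List.pySetD fl x false) flg).getD i true = false
          ↔ (flg.getD i true = false ∨ (i : Int) ∈ L)) := by
  induction L with
  | nil => exact fun flg _ => ⟨rfl, fun i _ => by simp⟩
  | cons x L ih =>
    intro flg hL
    obtain ⟨hx0, hxlen⟩ := hL x List.mem_cons_self
    rw [List.foldl_cons, PySem.List.pySetD_of_nonneg flg false hx0]
    obtain ⟨ihlen, ihval⟩ := ih (flg.set x.toNat false)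
      (fun y hy => ⟨(hL y (List.mem_cons_of_mem x hy)).1, by
        rw [List.length_set]; exact (hL y (List.mem_cons_of_mem x hy)).2⟩)
    rw [List.length_set] at ihlen
    refine ⟨ihlen, fun i hi => ?_⟩
    rw [ihval i (by rw [List.length_set]; exact hi), getD_set_if]
    rw [List.mem_cons]
    by_cases he : i = x.toNat
    · have hxe : (i : Int) = x := by omega
      rw [if_pos ⟨he, by omega⟩]
      simp [hxe]
    · have hxe : ¬ (i : Int) = x := by omega
      rw [if_neg (fun hh => he hh.1)]
      simp only [hxe, false_or]

theorem mark_spec (n p : Nat) (hp3 : 3 ≤ p) (hodd : ¬ 2 ∣ p) (flg : List Bool)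
    (hlen : flg.length = n + 1) :
    (FZTmark n p flg).length = n + 1
    ∧ ∀ i, i ≤ n →
      ((FZTmark n p flg).getD i true = false
        ↔ (flg.getD i true = false ∨ (¬ 2 ∣ i ∧ p ∣ i ∧ p * p ≤ i))) := by
  have hmem : ∀ (x : Int), x ∈ PySem.List.pyRange ((p : Int) * (p : Int)) ((n : Int) + 1) (2 * (p : Int))
      ↔ ((p : Int) * p ≤ x ∧ x < (n : Int) + 1 ∧ (2 * (p : Int)) ∣ x - p * p) := by
    intro x
    exact PySem.List.mem_pyRange_iff_of_pos (by positivity) x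
  have hbound : ∀ x ∈ PySem.List.pyRange ((p : Int) * (p : Int)) ((n : Int) + 1) (2 * (p : Int)),
      0 ≤ x ∧ x.toNat < flg.length := by
    intro x hx
    rw [hmem] at hx
    constructor
    · nlinarith [hx.1]
    · rw [hlen]; omega
  have hpp_odd : ¬ 2 ∣ (p * p) := fun h => by
    rcases (Nat.Prime.dvd_mul Nat.prime_two).mp h with h' | h' <;> exact hodd h'
  obtain ⟨h1, h2⟩ := foldl_pySetD_false _ flg hbound
  rw [hlen] at h1 h2
  unfold FZTmark
  refine ⟨h1, fun i hi => ?_⟩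
  rw [h2 i (by omega), hmem]
  constructor
  · rintro (h | ⟨hle, _, hdvd⟩)
    · exact Or.inl h
    · refine Or.inr ⟨?_, ?_, by exact_mod_cast hle⟩
      · have hple : p * p ≤ i := by exact_mod_cast hle
        have hdn : (2*p : Nat) ∣ (i - p*p) := by
          have hcast : (i : Int) - (p:Int)*p = ((i - p*p : Nat) : Int) := by push_cast [hple]; ring
          rw [hcast] at hdvd
          exact_mod_cast hdvd
        have h2d : 2 ∣ (i - p*p) := dvd_trans ⟨p, rfl⟩ hdn
        omega
      · have hple : p * p ≤ i := by exact_mod_cast hle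
        have hdn : (2*p : Nat) ∣ (i - p*p) := by
          have hcast : (i : Int) - (p:Int)*p = ((i - p*p : Nat) : Int) := by push_cast [hple]; ring
          rw [hcast] at hdvd
          exact_mod_cast hdvd
        have hpd : p ∣ (i - p*p) := dvd_trans ⟨2, mul_comm 2 p⟩ hdn
        have := Nat.dvd_add hpd (Dvd.intro p rfl)
        rwa [Nat.sub_add_cancel hple] at this
  · rintro (h | ⟨hoi, hpd, hple⟩)
    · exact Or.inl h
    · refine Or.inr ⟨by exact_mod_cast hple, by omega, ?_⟩
      have hps : p ∣ (i - p*p) := Nat.dvd_sub hpd (Dvd.intro p rfl)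
      have h2s : 2 ∣ (i - p*p) := by omega
      have hcop : Nat.Coprime 2 p := (Nat.Prime.coprime_iff_not_dvd Nat.prime_two).mpr hodd
      have hdn : (2*p : Nat) ∣ (i - p*p) := Nat.Coprime.mul_dvd_of_dvd_of_dvd hcop h2s hps
      have hcast : (i : Int) - (p:Int)*p = ((i - p*p : Nat) : Int) := by push_cast [hple]; ring
      rw [hcast]
      exact_mod_cast hdn

theorem marked_self_iff {p : Nat} (hp3 : 3 ≤ p) (hodd : ¬ 2 ∣ p) :
    Marked p p ↔ ¬ p.Prime := by
  constructor
  · rintro ⟨_, q, hqp, hq, hqd, hqs⟩ hP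
    rcases (Nat.Prime.eq_one_or_self_of_dvd hP q hqd) with rfl | rfl
    · exact Nat.not_prime_one hq
    · omega
  · intro hnp
    refine ⟨hodd, p.minFac, ?_, Nat.minFac_prime (by omega), Nat.minFac_dvd p, ?_⟩
    · have h1 := Nat.minFac_sq_le_self (by omega : 0 < p) hnp
      have h2 : 2 ≤ p.minFac := (Nat.minFac_prime (by omega : p ≠ 1)).two_le
      nlinarith [sq p.minFac ▸ h1]
    · have h1 := Nat.minFac_sq_le_self (by omega : 0 < p) hnp
      nlinarith [sq p.minFac ▸ h1]

theorem marked_final {n p i : Nat} (hnp : ¬ p * p ≤ n) (hi : i ≤ n) :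
    Marked p i ↔ (¬ 2 ∣ i ∧ 1 < i ∧ ¬ i.Prime) := by
  constructor
  · rintro ⟨hoi, q, hqp, hq, hqd, hqs⟩
    have h2 : 2 ≤ q := hq.two_le
    have h4 : 4 ≤ i := le_trans (by nlinarith) hqs
    refine ⟨hoi, by omega, fun hP => ?_⟩
    rcases Nat.Prime.eq_one_or_self_of_dvd hP q hqd with rfl | rfl
    · exact Nat.not_prime_one hq
    · nlinarith
  · rintro ⟨hoi, h1, hnpr⟩
    have hq := Nat.minFac_prime (by omega : i ≠ 1)
    have hqs := Nat.minFac_sq_le_self (by omega : 0 < i) hnpr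
    have hqs' : i.minFac * i.minFac ≤ i := by nlinarith [sq i.minFac ▸ hqs]
    refine ⟨hoi, i.minFac, ?_, hq, Nat.minFac_dvd i, hqs'⟩
    have h5 : i.minFac * i.minFac < p * p := by omega
    exact Nat.mul_self_lt_mul_self_iff.mp h5

theorem sieve_spec (n : Nat) :
    ∀ (p : Nat) (flg : List Bool), 3 ≤ p → ¬ 2 ∣ p → flg.length = n + 1 →
      (∀ i, i ≤ n → (flg.getD i true = false ↔ Marked p i)) →
      (FZTsieve n p flg).length = n + 1
      ∧ ∀ i, i ≤ n →
        ((FZTsieve n p flg).getD i true = false ↔ (¬ 2 ∣ i ∧ 1 < i ∧ ¬ i.Prime)) := by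
  intro p flg
  induction p, flg using FZTsieve.induct n with
  | case1 p flg h ih =>
    intro hp3 hodd hlen hinv
    rw [FZTsieve, dif_pos h]
    have hpn : p ≤ n := le_trans (Nat.le_mul_of_pos_left p (by omega)) h
    have hguard : PySem.List.pyGetD flg (p : Int) true = flg.getD p true :=
      PySem.List.pyGetD_natCast flg p true
    have hpp : flg.getD p true = false ↔ ¬ p.Prime := by
      rw [hinv p hpn, marked_self_iff hp3 hodd]
    have hodd2 : ¬ 2 ∣ (p + 2) := by omega
    have hq21 : ∀ q, q = p + 1 → ¬ q.Prime := by
      rintro q rfl hq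
      have h2d : 2 ∣ p + 1 := by omega
      rcases hq.eq_one_or_self_of_dvd 2 h2d with h' | h' <;> omega
    by_cases hgd : flg.getD p true = true
    · have hprime : p.Prime := by
        by_contra hnp
        rw [hpp.mpr hnp] at hgd
        exact Bool.false_ne_true hgd
      have hft : (if PySem.List.pyGetD flg (p : Int) true = true then FZTmark n p flg else flg)
          = FZTmark n p flg := by rw [if_pos (hguard.trans hgd)]
      rw [hft]
      obtain ⟨hmlen, hmval⟩ := mark_spec n p hp3 hodd flg hlen
      rw [dif_pos (hguard.trans hgd)] at ih
      apply ih (by omega) hodd2 hmlen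
      intro i hi
      rw [hmval i hi]
      constructor
      · rintro (hf | ⟨ho, hd, hs⟩)
        · obtain ⟨ho, q, hqlt, hq, hqd, hqs⟩ := (hinv i hi).mp hf
          exact ⟨ho, q, by omega, hq, hqd, hqs⟩
        · exact ⟨ho, p, by omega, hprime, hd, hs⟩
      · rintro ⟨ho, q, hqlt, hq, hqd, hqs⟩
        rcases (by omega : q < p ∨ q = p ∨ q = p + 1) with hc | hc | hc
        · exact Or.inl ((hinv i hi).mpr ⟨ho, q, hc, hq, hqd, hqs⟩)
        · exact Or.inr ⟨ho, hc ▸ hqd, hc ▸ hqs⟩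
        · exact absurd hq (hq21 q hc)
    · have hgdf : flg.getD p true = false := by
        revert hgd; cases flg.getD p true <;> simp
      have hnprime : ¬ p.Prime := hpp.mp hgdf
      have hft : (if PySem.List.pyGetD flg (p : Int) true = true then FZTmark n p flg else flg)
          = flg := by rw [if_neg (fun hh => hgd (hguard.symm.trans hh))]
      rw [hft]
      rw [dif_neg (fun hh => hgd (hguard.symm.trans hh))] at ih
      apply ih (by omega) hodd2 hlen
      intro i hi
      rw [hinv i hi]
      constructor
      · rintro ⟨ho, q, hqlt, hq, hqd, hqs⟩
        exact ⟨ho, q, by omega, hq, hqd, hqs⟩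
      · rintro ⟨ho, q, hqlt, hq, hqd, hqs⟩
        rcases (by omega : q < p ∨ q = p ∨ q = p + 1) with hc | hc | hc
        · exact ⟨ho, q, hc, hq, hqd, hqs⟩
        · exact absurd hq (hc ▸ hnprime)
        · exact absurd hq (hq21 q hc)
  | case2 p flg h =>
    intro hp3 hodd hlen hinv
    rw [FZTsieve, dif_neg h]
    exact ⟨hlen, fun i hi => by rw [hinv i hi, marked_final h hi]⟩

theorem mem_natOdds {n i : Nat} : i ∈ natOdds n ↔ (¬ 2 ∣ i ∧ 3 ≤ i ∧ i ≤ n) := by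
  unfold natOdds
  simp only [List.mem_map, List.mem_range]
  constructor
  · rintro ⟨k, hk, rfl⟩; omega
  · rintro ⟨ho, h3, hn⟩; exact ⟨(i-3)/2, by omega, by omega⟩

theorem natOdds_nodup (n : Nat) : (natOdds n).Nodup :=
  List.Nodup.map (fun a b h => by omega) (List.nodup_range)

theorem natPrimes_prime {n : Nat} {flg : List Bool}
    (hflg : ∀ i, i ≤ n → (flg.getD i true = false ↔ (¬ 2 ∣ i ∧ 1 < i ∧ ¬ i.Prime))) :
    ∀ q ∈ natPrimes n flg, q.Prime := by
  intro q hq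
  rcases List.mem_cons.mp hq with rfl | hq'
  · exact Nat.prime_two
  · obtain ⟨hodds, htrue⟩ := List.mem_filter.mp hq'
    obtain ⟨ho, h3, hn⟩ := mem_natOdds.mp hodds
    by_contra hnp
    rw [(hflg q hn).mpr ⟨ho, by omega, hnp⟩] at htrue
    exact Bool.false_ne_true htrue

theorem natPrimes_complete {n : Nat} {flg : List Bool}
    (hflg : ∀ i, i ≤ n → (flg.getD i true = false ↔ (¬ 2 ∣ i ∧ 1 < i ∧ ¬ i.Prime))) :
    ∀ q, q.Prime → q ≤ n → q ∈ natPrimes n flg := by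
  intro q hq hqn
  by_cases h2 : q = 2
  · exact h2 ▸ List.mem_cons_self
  · have hodd : ¬ 2 ∣ q := by
      intro hd
      rcases hq.eq_one_or_self_of_dvd 2 hd with h' | h' <;> omega
    have h3 : 3 ≤ q := by have := hq.two_le; omega
    apply List.mem_cons_of_mem
    apply List.mem_filter.mpr
    refine ⟨mem_natOdds.mpr ⟨hodd, h3, hqn⟩, ?_⟩
    have hne : flg.getD q true ≠ false := fun hf => ((hflg q hqn).mp hf).2.2 hq
    revert hne
    cases flg.getD q true <;> simp

theorem natPrimes_nodup (n : Nat) (flg : List Bool) : (natPrimes n flg).Nodup := by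
  unfold natPrimes
  rw [List.nodup_cons]
  constructor
  · intro h2
    have := mem_natOdds.mp (List.mem_filter.mp h2).1
    omega
  · exact (natOdds_nodup n).filter _

theorem primes_port (n : Nat) (flg : List Bool) :
    (PySem.List.pyRange 3 ((n : Int) + 1) 2).foldl
      (fun ps i => if PySem.List.pyGetD flg i true then ps ++ [i] else ps) ([2] : List Int)
    = (natPrimes n flg).map (fun q : Nat => (q : Int)) := by
  rw [show (fun (ps : List Int) (i : Int) => if PySem.List.pyGetD flg i true then ps ++ [i] else ps)
      = (fun acc x => if (fun i => PySem.List.pyGetD flg i true) x = true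
          then acc ++ [(fun (i : Int) => i) x] else acc) from rfl,
    PySem.List.foldl_append_if, pyRange_odd n, List.filter_map]
  unfold natPrimes natOdds
  rw [List.filter_map]
  have hfn : ((fun i => PySem.List.pyGetD flg i true) ∘ fun k => ((3 + 2 * k : Nat) : Int))
      = (fun i => flg.getD i true) ∘ (fun k => 3 + 2 * k) := by
    funext k
    exact PySem.List.pyGetD_natCast flg (3 + 2*k) true
  rw [hfn]
  simp

theorem FZT_eq_alt (f : List Int) : FZT f = FZT_alt f := by
  by_cases hn : f.length ≤ 1
  · simp only [FZT, FZT_alt]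
    rw [if_pos hn, if_pos hn]
  · -- the sieve flags describe primality on odd 3 ≤ i ≤ n
    have hrep : (List.replicate (f.length + 1) true).length = f.length + 1 := by simp
    have hinv3 : ∀ i, i ≤ f.length →
        ((List.replicate (f.length + 1) true).getD i true = false ↔ Marked 3 i) := by
      intro i hi
      have htrue : (List.replicate (f.length + 1) true).getD i true = true := by
        rw [List.getD_eq_getElem?_getD, List.getElem?_replicate]
        split <;> rfl
      rw [htrue]
      constructor
      · intro hf; exact Bool.noConfusion hf
      · rintro ⟨ho, q, hq3, hq, hqd, _⟩
        have := hq.two_le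
        have hq2 : q = 2 := by omega
        exact absurd (hq2 ▸ hqd) ho
    obtain ⟨hslen, hsval⟩ :=
      sieve_spec f.length 3 (List.replicate (f.length + 1) true) (by omega) (by omega) hrep hinv3
    -- A side
    have hA : FZT f = (natPrimes f.length (FZTsieve f.length 3 (List.replicate (f.length + 1) true))).foldl
        (fun (g : List Int) (q : Nat) =>
          ((PySem.List.pyRange (q : Int) ((f.length : Int) + 1) (q : Int)).foldl stepA (g, (0:Int))).1) f := by
      simp only [FZT]
      rw [if_neg hn, primes_port f.length (FZTsieve f.length 3 (List.replicate (f.length + 1) true)),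
        List.foldl_map, PySem.List.map_pyGetD_pyRange_zero' f 0]
      rfl
    have hprime := natPrimes_prime hsval
    have hcomplete := natPrimes_complete hsval
    have hnodup := natPrimes_nodup f.length (FZTsieve f.length 3 (List.replicate (f.length + 1) true))
    obtain ⟨hAlen, hAval⟩ := outerA f f.length
      (natPrimes f.length (FZTsieve f.length 3 (List.replicate (f.length + 1) true))) [] f
      hprime hnodup (by simp) rfl (fun m hm => (fsum_nil f m).symm)
    -- B side
    have hB : FZT_alt f = (List.range f.length).foldl (fun (g : List Int) (t : Nat) =>
        (PySem.List.pyRange ((t+1 : Nat) : Int) ((f.length : Int)+1) ((t+1 : Nat) : Int)).foldl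
          (stepB (f.getD t 0)) g) (List.replicate f.length 0) := by
      simp only [FZT_alt]
      rw [if_neg hn, PySem.List.pyRange_one 1 ((f.length : Int) + 1)]
      have hc1 : ((f.length : Int) + 1 - 1).toNat = f.length := by omega
      rw [hc1]
      have hfun : (fun k : Nat => (1 : Int) + (k : Int)) = (fun k : Nat => ((k + 1 : Nat) : Int)) := by
        funext k; push_cast; ring
      rw [hfun, List.foldl_map]
      have hout : (fun (x : List Int) (k : Nat) =>
          (PySem.List.pyRange ((k+1 : Nat) : Int) ((f.length : Int)+1) ((k+1 : Nat) : Int)).foldl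
            (fun (g : List Int) (j : Int) => PySem.List.pySetD g (j - 1)
              (PySem.List.pyGetD g (j - 1) 0 + PySem.List.pyGetD f (((k+1 : Nat) : Int) - 1) 0)) x)
          = (fun (g : List Int) (t : Nat) =>
          (PySem.List.pyRange ((t+1 : Nat) : Int) ((f.length : Int)+1) ((t+1 : Nat) : Int)).foldl
            (stepB (f.getD t 0)) g) := by
        funext g t
        have hcast : ((t + 1 : Nat) : Int) - 1 = ((t : Nat) : Int) := by push_cast; ring
        have hbody : (fun (g : List Int) (j : Int) => PySem.List.pySetD g (j - 1)
              (PySem.List.pyGetD g (j - 1) 0 + PySem.List.pyGetD f (((t + 1 : Nat) : Int) - 1) 0))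
            = stepB (f.getD t 0) := by
          funext g j
          rw [stepB, hcast, PySem.List.pyGetD_natCast]
        rw [hbody]
      exact congrFun (congrFun (congrArg List.foldl hout) (List.replicate f.length 0)) (List.range f.length)
    obtain ⟨hBlen, hBval⟩ := outerB f f.length f.length le_rfl
    -- combine
    rw [hA, hB]
    apply List.ext_getElem (by rw [hAlen, hBlen])
    intro m h1 h2
    have hmn : m < f.length := by rw [hAlen] at h1; exact h1
    rw [← List.getD_eq_getElem _ 0 h1, ← List.getD_eq_getElem _ 0 h2]
    rw [hAval m hmn, hBval m hmn, range_sum_divisors f f.length m hmn]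
    rw [fsum_congr f (P' := natPrimes f.length (FZTsieve f.length 3 (List.replicate (f.length + 1) true)))
      (by simp) m]
    exact fsum_full f f.length _ hcomplete m hmn

-- ===== VERDICT (by name: the statement is the Claim_ definition above) =====
theorem FZT_spec : Claim_equal_FZT := by
  intro f _
  exact FZT_eq_alt f
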